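-- pv_equiv track=rewrite | github.com/Hertz-7/programming-fundamentals | assignment3.py | openLocks
-- ===== SOURCE A (Python) =====
-- def openLocks(number_of_lockers ,number_of_students):
--     if number_of_lockers <0 or number_of_students < 0:
--         return None
--     op=0
--     for x in range(1 , number_of_lockers+1):
--         c=0
--
--         for y in range(1 , number_of_students+1):
--             if x%y == 0 :
--                 c=c+1
--
--         if c%2 == 1:
--             op = op +1
--
--     return op
-- ===== SOURCE B (Python) =====
-- def openLocks(number_of_lockers, number_of_students):
--     if number_of_lockers < 0 or number_of_students < 0:
--         return None
--     opened = [False] * (number_of_lockers + 1)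
--     for y in range(1, number_of_students + 1):
--         for m in range(y, number_of_lockers + 1, y):
--             opened[m] = not opened[m]
--     total = 0
--     for v in opened[1:]:
--         if v:
--             total = total + 1
--     return total
-- ===== Notes on version B (the rewrite author's own statement) =====
-- stated objective: faster
-- what changed: Replaces the per-locker scan over all students (trial division for every locker) by a sieve: each student toggles only their own multiples in a boolean array, then open lockers are counted.
import Mathlib
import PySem

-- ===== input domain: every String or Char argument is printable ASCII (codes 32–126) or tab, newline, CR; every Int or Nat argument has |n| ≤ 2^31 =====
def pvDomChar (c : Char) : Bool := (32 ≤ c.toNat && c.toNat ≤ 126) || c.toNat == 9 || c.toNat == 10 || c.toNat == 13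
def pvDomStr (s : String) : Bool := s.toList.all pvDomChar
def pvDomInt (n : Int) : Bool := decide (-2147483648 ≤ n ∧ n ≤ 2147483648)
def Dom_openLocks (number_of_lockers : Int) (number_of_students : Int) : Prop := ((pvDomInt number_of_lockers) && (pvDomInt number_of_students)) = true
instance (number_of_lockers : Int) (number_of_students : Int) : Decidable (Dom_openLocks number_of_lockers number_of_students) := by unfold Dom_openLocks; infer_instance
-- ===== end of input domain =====

-- B replaces A's per-locker trial division over all students by a toggle sieve over each
-- student's multiples (objective: faster, asymptotic change measured).

-- ===== PORT A =====
def openLocks (number_of_lockers : Int) (number_of_students : Int) : Option Int :=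
  if number_of_lockers < 0 ∨ number_of_students < 0 then none
  else
    some ((PySem.List.pyRange 1 (number_of_lockers + 1) 1).foldl (fun op x =>
      let c := (PySem.List.pyRange 1 (number_of_students + 1) 1).foldl
        (fun c y => if PySem.Int.mod x y == 0 then c + 1 else c) (0 : Int)
      if PySem.Int.mod c 2 == 1 then op + 1 else op) (0 : Int))

-- ===== PORT B =====
-- Source B's 'opened[m] = not opened[m]': every index m from range(y, L+1, y) satisfies
-- 0 ≤ m ≤ L < len(opened), so List.set / List.getD on m.toNat is exact here.
def openLocks_alt (number_of_lockers : Int) (number_of_students : Int) : Option Int :=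
  if number_of_lockers < 0 ∨ number_of_students < 0 then none
  else
    let opened0 : List Bool := List.replicate (number_of_lockers + 1).toNat false
    let opened := (PySem.List.pyRange 1 (number_of_students + 1) 1).foldl
      (fun a y => (PySem.List.pyRange y (number_of_lockers + 1) y).foldl
        (fun a m => a.set m.toNat (!(a.getD m.toNat false))) a) opened0
    some ((opened.drop 1).foldl (fun t v => if v then t + 1 else t) (0 : Int))

-- ===== PRECONDITION & SPEC =====
def Spec_openLocks (number_of_lockers : Int) (number_of_students : Int) (out : Option Int) : Prop := out = openLocks_alt number_of_lockers number_of_students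
instance (number_of_lockers : Int) (number_of_students : Int) (out : Option Int) : Decidable (Spec_openLocks number_of_lockers number_of_students out) := by unfold Spec_openLocks; infer_instance

-- ===== CLAIM (what is proved, stated in full; the proofs are below) =====
def Claim_equal_openLocks : Prop := ∀ (number_of_lockers : Int) (number_of_students : Int), Dom_openLocks number_of_lockers number_of_students → Spec_openLocks number_of_lockers number_of_students (openLocks number_of_lockers number_of_students)

-- ===== LEMMAS AND PROOFS =====

-- one flip pass: length is preserved
theorem flip_length (ms : List Int) (arr : List Bool) :
    (ms.foldl (fun a m => a.set m.toNat (!(a.getD m.toNat false))) arr).length = arr.length := by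
  induction ms generalizing arr with
  | nil => rfl
  | cons m ms ih => rw [List.foldl_cons, ih]; simp

-- one flip pass, pointwise: an index is toggled iff it occurs in ms (indices are distinct, nonneg)
theorem flip_getD (ms : List Int) (hnd : ms.Nodup) (hpos : ∀ m ∈ ms, 0 ≤ m)
    (arr : List Bool) (i : Nat) (hi : i < arr.length) :
    (ms.foldl (fun a m => a.set m.toNat (!(a.getD m.toNat false))) arr).getD i false
      = if (i : Int) ∈ ms then !(arr.getD i false) else arr.getD i false := by
  induction ms generalizing arr with
  | nil => simp
  | cons m ms ih =>
    have hm0 : 0 ≤ m := hpos m (by simp)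
    have hnd' : ms.Nodup := hnd.of_cons
    have hmnot : m ∉ ms := by simp at hnd; exact hnd.1
    rw [List.foldl_cons,
      ih hnd' (fun x hx => hpos x (by simp [hx])) _ (by simpa using hi)]
    by_cases heq : (i : Int) = m
    · have hiN : i = m.toNat := by omega
      have : (i : Int) ∉ ms := heq ▸ hmnot
      simp only [heq, hmnot, if_false, ← hiN, List.getD_eq_getElem?_getD,
        List.getElem?_set_self']
      simp [hi]
    · have hiN : i ≠ m.toNat := by omega
      simp [heq, List.getD_eq_getElem?_getD, List.getElem?_set_ne (by omega : m.toNat ≠ i)]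

-- range(y, L+1, y) has distinct, nonnegative entries (y ≥ 1)
theorem stride_nodup (y b : Int) (hy : 1 ≤ y) : (PySem.List.pyRange y b y).Nodup := by
  rw [PySem.List.pyRange_of_pos _ _ (by omega)]
  exact (List.nodup_range).map (fun a b h => by
    have : (a : Int) = b := by
      have := h
      nlinarith [this]
    exact_mod_cast this)

-- membership in the stride range, for 1 ≤ i ≤ L: exactly the multiples of y
theorem stride_mem (y L : Int) (hy : 1 ≤ y) (i : Int) (h1 : 1 ≤ i) (hL : i ≤ L) :
    (i ∈ PySem.List.pyRange y (L + 1) y) ↔ y ∣ i := by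
  rw [PySem.List.mem_pyRange_iff_of_pos (by omega)]
  constructor
  · rintro ⟨-, -, hd⟩
    have : y ∣ (i - y) + y := dvd_add hd ⟨1, by ring⟩
    simpa using this
  · intro hd
    exact ⟨Int.le_of_dvd (by omega) hd, by omega, dvd_sub hd dvd_rfl⟩

-- the whole sieve, pointwise: opened[i] = parity of the number of divisors of i among ys
theorem sieve_getD (L : Int) (ys : List Int) (hys : ∀ y ∈ ys, 1 ≤ y)
    (arr : List Bool) (harr : arr.length = (L + 1).toNat)
    (i : Nat) (h1 : 1 ≤ i) (hL : (i : Int) ≤ L) :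
    ((ys.foldl (fun a y => (PySem.List.pyRange y (L + 1) y).foldl
        (fun a m => a.set m.toNat (!(a.getD m.toNat false))) a) arr).getD i false)
      = xor (arr.getD i false) (decide ((ys.countP (fun y => decide (y ∣ (i : Int)))) % 2 = 1)) := by
  induction ys generalizing arr with
  | nil => simp
  | cons y ys ih =>
    have hy : 1 ≤ y := hys y (by simp)
    have hi : i < arr.length := by omega
    rw [List.foldl_cons, ih (fun x hx => hys x (by simp [hx]))
        _ (by rw [flip_length]; exact harr),
      flip_getD _ (stride_nodup y (L + 1) hy)
        (fun m hm => by
          have := (PySem.List.mem_pyRange_iff_of_pos (by omega : (0:Int) < y) m).1 hm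
          omega) _ _ hi]
    simp only [stride_mem y L hy _ (by exact_mod_cast h1) hL]
    by_cases hd : y ∣ (i : Int)
    · simp only [List.countP_cons, hd, decide_true]
      cases hg : arr.getD i false <;>
        rcases Nat.even_or_odd (ys.countP fun y => decide (y ∣ (i : Int))) with ⟨k, hk⟩ | ⟨k, hk⟩ <;>
          simp [hk, show (k + k) % 2 = 0 from by omega, show (k + k + 1) % 2 = 1 from by omega,
            show (2 * k + 1 + 1) % 2 = 0 from by omega]
    · simp [hd]

-- A's outer-loop test, written as the parity of the divisor count
theorem a_pred (S x : Int) :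
    (fun op => if PySem.Int.mod ((PySem.List.pyRange 1 (S + 1) 1).foldl
        (fun c y => if PySem.Int.mod x y == 0 then c + 1 else c) (0 : Int)) 2 == 1
      then op + 1 else op)
    = (fun op : Int => if decide (((PySem.List.pyRange 1 (S + 1) 1).countP
        (fun y => decide (y ∣ x))) % 2 = 1) then op + 1 else op) := by
  funext op
  have hc : (PySem.List.pyRange 1 (S + 1) 1).foldl
      (fun c y => if PySem.Int.mod x y == 0 then c + 1 else c) (0 : Int)
      = ((PySem.List.pyRange 1 (S + 1) 1).countP (fun y => decide (y ∣ x)) : Int) := by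
    rw [show (fun (c : Int) y => if PySem.Int.mod x y == 0 then c + 1 else c)
        = (fun c y => if (fun y => decide (y ∣ x)) y then c + 1 else c) from by
      funext c y
      rw [show (PySem.Int.mod x y == 0) = decide (y ∣ x) from by
        rw [Bool.eq_iff_iff]; simp [PySem.Int.mod_eq_zero_iff_dvd]]]
    rw [PySem.List.foldl_if_add_one]; ring
  rw [hc]
  congr 1
  rw [Bool.eq_iff_iff]
  rw [show ((PySem.List.pyRange 1 (S + 1) 1).countP (fun y => decide (y ∣ x)) : Int)
      = ((PySem.List.pyRange 1 (S + 1) 1).countP (fun y => decide (y ∣ x)) : Nat) from rfl]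
  rw [show (2 : Int) = ((2 : Nat) : Int) from rfl, PySem.Int.mod_natCast]
  simp; omega

theorem sieve_length (L : Int) (ys : List Int) (arr : List Bool) :
    (ys.foldl (fun a y => (PySem.List.pyRange y (L + 1) y).foldl
        (fun a m => a.set m.toNat (!(a.getD m.toNat false))) a) arr).length = arr.length := by
  induction ys generalizing arr with
  | nil => rfl
  | cons y ys ih => rw [List.foldl_cons, ih, flip_length]

theorem openLocks_spec_aux (L S : Int) : openLocks L S = openLocks_alt L S := by
  unfold openLocks openLocks_alt
  by_cases h : L < 0 ∨ S < 0
  · simp [h]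
  · simp only [if_neg h]
    have hL : 0 ≤ L := by omega
    have hS : 0 ≤ S := by omega
    congr 1
    -- A's side is a countP over the lockers
    rw [show (fun op x => if PySem.Int.mod ((PySem.List.pyRange 1 (S + 1) 1).foldl
          (fun c y => if PySem.Int.mod x y == 0 then c + 1 else c) (0 : Int)) 2 == 1
        then op + 1 else op)
      = (fun (op : Int) (x : Int) => if (fun x => decide (((PySem.List.pyRange 1 (S + 1) 1).countP
          (fun y => decide (y ∣ x))) % 2 = 1)) x then op + 1 else op) from by
        funext op x; exact congrFun (a_pred S x) op]
    rw [PySem.List.foldl_if_add_one]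
    -- B's side is a countP over the final array
    rw [show (fun (t : Int) (v : Bool) => if v then t + 1 else t)
        = (fun t v => if (fun v : Bool => v) v then t + 1 else t) from rfl]
    rw [PySem.List.foldl_if_add_one]
    -- the final array (minus slot 0) lists exactly the per-locker parities
    have key : ((PySem.List.pyRange 1 (S + 1) 1).foldl
          (fun a y => (PySem.List.pyRange y (L + 1) y).foldl
            (fun a m => a.set m.toNat (!(a.getD m.toNat false))) a)
          (List.replicate (L + 1).toNat false)).drop 1
        = (PySem.List.pyRange 1 (L + 1) 1).map
            (fun x => decide (((PySem.List.pyRange 1 (S + 1) 1).countP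
              (fun y => decide (y ∣ x))) % 2 = 1)) := by
      have hlen : ((PySem.List.pyRange 1 (S + 1) 1).foldl
          (fun a y => (PySem.List.pyRange y (L + 1) y).foldl
            (fun a m => a.set m.toNat (!(a.getD m.toNat false))) a)
          (List.replicate (L + 1).toNat false)).length = (L + 1).toNat := by
        rw [sieve_length]; simp
      apply List.ext_getElem
      · rw [List.length_drop, hlen, List.length_map, PySem.List.length_pyRange_one]; omega
      · intro j hj hj'
        rw [List.length_map, PySem.List.length_pyRange_one] at hj'
        rw [List.getElem_drop]
        rw [List.getElem_map, PySem.List.getElem_pyRange_one]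
        rw [← List.getD_eq_getElem _ false (by rw [hlen]; omega)]
        rw [sieve_getD L _ (fun y hy => ((PySem.List.mem_pyRange_one).1 hy).1)
          _ (by simp) (1 + j) (by omega) (by push_cast; omega)]
        simp only [List.getD_eq_getElem?_getD, List.getElem?_replicate]
        simp only [show 1 + j < (L + 1).toNat from by omega, if_pos,
          Option.getD_some, Bool.false_xor]
        push_cast
        rfl
    rw [key, List.countP_map]
    rw [show (PySem.List.pyRange 1 (L + 1) 1).countP
        ((fun v => v) ∘ fun x => decide (((PySem.List.pyRange 1 (S + 1) 1).countP
          (fun y => decide (y ∣ x))) % 2 = 1))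
      = (PySem.List.pyRange 1 (L + 1) 1).countP
        (fun x => decide (((PySem.List.pyRange 1 (S + 1) 1).countP
          (fun y => decide (y ∣ x))) % 2 = 1)) from List.countP_congr (fun x _ => Iff.rfl)]
-- ===== VERDICT (by name: the statement is the Claim_ definition above) =====
theorem openLocks_spec : Claim_equal_openLocks := by
  intro L S _
  unfold Spec_openLocks
  exact openLocks_spec_aux L S
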